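-- pv_equiv track=rewrite | github.com/zwong91/RealtimeVoiceChat | code/turndetect.py | find_matching_texts
-- ===== SOURCE A (Python) =====
-- import collections
--
-- def find_matching_texts(texts_without_punctuation: collections.deque) -> list[tuple[str, str]]:
--     """
--     Finds recent consecutive entries with the same stripped text.
--
--     Iterates backwards through the deque of (original_text, stripped_text) tuples.
--     It collects all entries matching the stripped text of the *last* entry,
--     stopping as soon as a non-matching stripped text is encountered.
--
--     Args:
--         texts_without_punctuation: A deque of tuples, where each tuple is
--                                    (original_text, stripped_text).
--
--     Returns:
--         A list of matching (original_text, stripped_text) tuples in their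
--         original order (oldest matching first). Returns an empty list if the
--         input deque is empty.
--     """
--     if not texts_without_punctuation:
--         return []
--
--     # Get the stripped text from the last entry
--     last_stripped_text = texts_without_punctuation[-1][1]
--
--     matching_entries = []
--
--     # Iterate through the deque backwards
--     for entry in reversed(texts_without_punctuation):
--         original_text, stripped_text = entry
--
--         # If we find a non-match, stop collecting
--         if stripped_text != last_stripped_text:
--             break
--
--         # Add the matching entry (will be reversed later)
--         matching_entries.append(entry)
--
--     # Reverse the results to maintain original insertion order
--     matching_entries.reverse()
--
--     return matching_entries
-- ===== SOURCE B (Python) =====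
-- import itertools
--
-- def find_matching_texts(texts_without_punctuation):
--     groups = [list(g) for _, g in
--               itertools.groupby(texts_without_punctuation, key=lambda e: e[1])]
--     return groups[-1] if groups else []
-- ===== Notes on version B (the rewrite author's own statement) =====
-- stated objective: idiomatic
-- what changed: Replaces the backward early-stopping accumulate-and-reverse loop with a single forward itertools.groupby pass over the stripped texts, returning the last maximal run.
import Mathlib
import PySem

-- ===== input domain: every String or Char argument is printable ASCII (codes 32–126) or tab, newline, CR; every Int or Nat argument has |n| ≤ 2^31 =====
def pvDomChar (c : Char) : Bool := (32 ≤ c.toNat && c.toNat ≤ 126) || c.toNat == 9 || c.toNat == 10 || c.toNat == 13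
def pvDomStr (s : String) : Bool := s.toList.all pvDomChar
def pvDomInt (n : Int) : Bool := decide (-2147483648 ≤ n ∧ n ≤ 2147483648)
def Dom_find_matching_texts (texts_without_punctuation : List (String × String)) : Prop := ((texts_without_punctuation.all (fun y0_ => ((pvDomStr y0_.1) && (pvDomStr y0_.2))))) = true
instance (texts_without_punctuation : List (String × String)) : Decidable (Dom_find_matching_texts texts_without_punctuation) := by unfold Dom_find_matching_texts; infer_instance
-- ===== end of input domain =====

-- B replaces A's backward early-stopping loop by a forward groupby pass that keeps the last run; objective: idiomatic.

-- ===== PORT A =====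
-- the backwards loop with break: collect matching entries from the reversed list, stop at first mismatch
def pvCollectA (key : String) : List (String × String) → List (String × String)
  | [] => []
  | e :: rest => if e.2 ≠ key then [] else e :: pvCollectA key rest

def find_matching_texts (texts_without_punctuation : List (String × String)) : List (String × String) :=
  match texts_without_punctuation.getLast? with
  | none => []                        -- `if not texts_without_punctuation: return []`
  | some lastE =>
    -- iterate backwards, appending matches, break at first mismatch; then reverse
    (pvCollectA lastE.2 texts_without_punctuation.reverse).reverse

-- ===== PORT B =====
-- itertools.groupby(key = stripped text): maximal runs of consecutive equal snd
def pvGroupRuns : List (String × String) → List (List (String × String))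
  | [] => []
  | e :: rest =>
    match pvGroupRuns rest with
    | [] => [[e]]
    | g :: gs =>
      if (g.head?.map (·.2)) = some e.2 then (e :: g) :: gs else [e] :: g :: gs

def find_matching_texts_alt (texts_without_punctuation : List (String × String)) : List (String × String) :=
  match (pvGroupRuns texts_without_punctuation).getLast? with
  | none => []                        -- `groups[-1] if groups else []`
  | some g => g

-- ===== PRECONDITION & SPEC =====
def Spec_find_matching_texts (texts_without_punctuation : List (String × String)) (out : List (String × String)) : Prop := out = find_matching_texts_alt texts_without_punctuation
instance (texts_without_punctuation : List (String × String)) (out : List (String × String)) : Decidable (Spec_find_matching_texts texts_without_punctuation out) := by unfold Spec_find_matching_texts; infer_instance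

-- ===== CLAIM (what is proved, stated in full; the proofs are below) =====
def Claim_equal_find_matching_texts : Prop := ∀ (texts_without_punctuation : List (String × String)), Dom_find_matching_texts texts_without_punctuation → Spec_find_matching_texts texts_without_punctuation (find_matching_texts texts_without_punctuation)

-- ===== LEMMAS AND PROOFS =====

theorem pvCollectA_eq_takeWhile (key : String) (l : List (String × String)) :
    pvCollectA key l = l.takeWhile (fun p => p.2 == key) := by
  induction l with
  | nil => rfl
  | cons e rest ih =>
    simp only [pvCollectA, List.takeWhile_cons]
    by_cases h : e.2 = key
    · simp [h, ih]
    · simp [h]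

theorem pvGroupRuns_cons_shape (e : String × String) (rest : List (String × String)) :
    ∃ g gs, pvGroupRuns (e :: rest) = (e :: g) :: gs := by
  simp only [pvGroupRuns]
  cases pvGroupRuns rest with
  | nil => exact ⟨[], [], rfl⟩
  | cons g gs =>
    by_cases h : (g.head?.map (·.2)) = some e.2
    · exact ⟨g, gs, by simp [h]⟩
    · exact ⟨[], g :: gs, by simp [h]⟩

theorem pvGroupRuns_allEq (e : String × String) (rest : List (String × String))
    (h : ∀ p ∈ rest, p.2 = e.2) : pvGroupRuns (e :: rest) = [e :: rest] := by
  induction rest generalizing e with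
  | nil => rfl
  | cons f r ih =>
    have hf : f.2 = e.2 := h f (by simp)
    have hr : pvGroupRuns (f :: r) = [f :: r] :=
      ih f (fun p hp => by rw [h p (by simp [hp]), hf])
    show (match pvGroupRuns (f :: r) with
      | [] => [[e]]
      | g :: gs => if (g.head?.map (·.2)) = some e.2 then (e :: g) :: gs else [e] :: g :: gs)
      = [e :: f :: r]
    rw [hr]
    simp [hf]

theorem pvGroupRuns_single (xs g : List (String × String))
    (h : pvGroupRuns xs = [g]) : g = xs ∧ ∀ p ∈ xs, ∀ q ∈ xs, p.2 = q.2 := by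
  induction xs generalizing g with
  | nil => simp [pvGroupRuns] at h
  | cons e rest ih =>
    revert h
    show (match pvGroupRuns rest with
      | [] => [[e]]
      | g' :: gs => if (g'.head?.map (·.2)) = some e.2 then (e :: g') :: gs else [e] :: g' :: gs)
      = [g] → _
    cases hrec : pvGroupRuns rest with
    | nil =>
      intro h
      have hr : rest = [] := by
        cases rest with
        | nil => rfl
        | cons f r =>
          obtain ⟨g', gs', hsh⟩ := pvGroupRuns_cons_shape f r
          rw [hsh] at hrec; exact absurd hrec (by simp)
      subst hr
      simp at h
      subst h
      exact ⟨rfl, by simp⟩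
    | cons g' gs =>
      by_cases hm : (g'.head?.map (·.2)) = some e.2
      · simp only [hm, if_true]
        intro h
        have hgs : gs = [] ∧ g = e :: g' := by
          cases gs with
          | nil =>
            have hh : e :: g' = g := by simpa using h
            exact ⟨rfl, hh.symm⟩
          | cons a b => simp at h
        obtain ⟨hgs0, hg⟩ := hgs
        subst hgs0
        obtain ⟨hgr, hall⟩ := ih g' hrec
        refine ⟨by rw [hg, hgr], ?_⟩
        -- every element of rest has snd = e.2
        have hhead : ∀ p ∈ rest, p.2 = e.2 := by
          intro p hp
          cases hr0 : rest with
          | nil => rw [hr0] at hp; simp at hp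
          | cons f r =>
            have hf2 : f.2 = e.2 := by
              rw [hgr, hr0] at hm
              simpa using hm
            have := hall p hp f (by rw [hr0]; simp)
            rw [this, hf2]
        intro p hp q hq
        rcases List.mem_cons.mp hp with hp | hp <;> rcases List.mem_cons.mp hq with hq | hq
        · rw [hp, hq]
        · rw [hp, hhead q hq]
        · rw [hhead p hp, hq]
        · rw [hhead p hp, hhead q hq]
      · simp only [hm, if_false]
        intro h; simp at h
  
-- takeWhile over an append when every element of the first part passes
theorem pv_takeWhile_append_all {α : Type} (p : α → Bool) (l₁ l₂ : List α)
    (h : ∀ a ∈ l₁, p a = true) :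
    (l₁ ++ l₂).takeWhile p = l₁ ++ l₂.takeWhile p := by
  induction l₁ with
  | nil => simp
  | cons a l ih =>
    simp only [List.cons_append, List.takeWhile_cons, h a (by simp)]
    simp [ih (fun b hb => h b (by simp [hb]))]

-- takeWhile over an append when some element of the first part fails
theorem pv_takeWhile_append_stop {α : Type} (p : α → Bool) (l₁ l₂ : List α)
    (h : ∃ a ∈ l₁, p a = false) :
    (l₁ ++ l₂).takeWhile p = l₁.takeWhile p := by
  induction l₁ with
  | nil => simp at h
  | cons a l ih =>
    simp only [List.cons_append, List.takeWhile_cons]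
    by_cases ha : p a = true
    · have : ∃ b ∈ l, p b = false := by
        rcases h with ⟨b, hb, hpb⟩
        rcases List.mem_cons.mp hb with rfl | hb
        · rw [ha] at hpb; simp at hpb
        · exact ⟨b, hb, hpb⟩
      simp [ha, ih this]
    · simp [ha]

theorem pv_getLastD_cons {α : Type} (a : α) (l : List α) (h : l ≠ []) (d : α) :
    (a :: l).getLastD d = l.getLastD d := by
  cases l with
  | nil => exact absurd rfl h
  | cons b r => rfl

-- step equation for pvGroupRuns on two or more elements
theorem pvGroupRuns_step (e f : String × String) (r : List (String × String)) :
    ∃ g gs, pvGroupRuns (f :: r) = (f :: g) :: gs ∧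
      pvGroupRuns (e :: f :: r) =
        (if f.2 = e.2 then (e :: f :: g) :: gs else [e] :: (f :: g) :: gs) := by
  obtain ⟨g, gs, h⟩ := pvGroupRuns_cons_shape f r
  refine ⟨g, gs, h, ?_⟩
  show (match pvGroupRuns (f :: r) with
    | [] => [[e]]
    | g :: gs => if (g.head?.map (fun p : String × String => p.2)) = some e.2 then (e :: g) :: gs else [e] :: g :: gs) = _
  rw [h]
  by_cases hfe : f.2 = e.2 <;> simp [hfe]

-- main lemma: the last group of pvGroupRuns is the trailing run
theorem pv_main (xs : List (String × String)) :
    (pvGroupRuns xs).getLastD [] =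
      (xs.reverse.takeWhile (fun p => p.2 == ((xs.getLast?.map (·.2)).getD ""))).reverse := by
  induction xs with
  | nil => rfl
  | cons e rest ih =>
    cases rest with
    | nil => simp [pvGroupRuns]
    | cons f r =>
      obtain ⟨g', gs, hsh, hstep⟩ := pvGroupRuns_step e f r
      have hkey : ((e :: f :: r).getLast?.map (·.2)).getD "" = (((f :: r).getLast?.map (·.2))).getD "" := by
        simp [List.getLast?_cons_cons]
      set key := (((f :: r).getLast?.map (·.2))).getD "" with hkeydef
      have hrev : (e :: f :: r).reverse = (f :: r).reverse ++ [e] := by simp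
      rw [hstep, hkey, hrev]
      have hne : (f :: r) ≠ ([] : List (String × String)) := by simp
      have hlast : (f :: r).getLast? = some ((f :: r).getLast hne) := List.getLast?_eq_some_getLast hne
      have hkeyval : key = ((f :: r).getLast hne).2 := by rw [hkeydef, hlast]; rfl
      have hkeymem : (f :: r).getLast hne ∈ f :: r := List.getLast_mem _
      rw [hsh] at ih
      by_cases hall : ∀ p ∈ f :: r, p.2 = key
      · -- rest is all one run with snd = key
        have hfk : f.2 = key := hall f (by simp)
        have hone : pvGroupRuns (f :: r) = [f :: r] :=
          pvGroupRuns_allEq f r (fun p hp => by rw [hall p (by simp [hp]), hfk])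
        rw [hone] at hsh
        have hg' : g' = r := by injection hsh with h1 _; injection h1 with _ h2; exact h2.symm
        have hgs : gs = [] := by injection hsh with _ h2; exact h2.symm
        subst hg'; subst hgs
        by_cases hfe : f.2 = e.2
        · -- e extends the run: everything matches
          rw [if_pos hfe]
          have hek : e.2 = key := by rw [← hfe, hfk]
          rw [pv_takeWhile_append_all _ _ _ (by
            intro a ha
            simp only [List.mem_reverse] at ha
            simp [hall a ha])]
          simp [hek]
        · -- e starts a new group; the last group is still all of f :: r
          rw [if_neg hfe]
          have hek : ¬ e.2 = key := fun h => hfe (by rw [hfk, ← h])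
          rw [pv_takeWhile_append_all _ _ _ (by
            intro a ha
            simp only [List.mem_reverse] at ha
            simp [hall a ha])]
          simp [hek]
      · -- the trailing run stops inside rest
        have hstop : ∃ a ∈ (f :: r).reverse, (fun p => p.2 == key) a = false := by
          push Not at hall
          obtain ⟨p, hp, hpk⟩ := hall
          exact ⟨p, by simp only [List.mem_reverse]; exact hp, by simp [hpk]⟩
        have hgs : gs ≠ [] := by
          intro hgs0
          rw [hgs0] at hsh
          obtain ⟨hgr, hallp⟩ := pvGroupRuns_single _ _ hsh
          push Not at hall
          obtain ⟨p, hp, hpk⟩ := hall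
          exact hpk (by
            have := hallp p (by rw [← hgr] at hp; exact (hgr ▸ hp)) ((f :: r).getLast hne) hkeymem
            rw [this, hkeyval])
        rw [pv_takeWhile_append_stop _ _ _ hstop]
        by_cases hfe : f.2 = e.2
        · rw [if_pos hfe, pv_getLastD_cons _ _ hgs, ← ih]
          exact (pv_getLastD_cons _ _ hgs _).symm
        · rw [if_neg hfe,
            pv_getLastD_cons _ _ (by simp : ((f :: g') :: gs : List (List (String × String))) ≠ []), ← ih]

theorem pv_port_eq (xs : List (String × String)) :
    find_matching_texts xs = find_matching_texts_alt xs := by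
  cases hx : xs.getLast? with
  | none =>
    have : xs = [] := by
      cases xs with
      | nil => rfl
      | cons a l => simp [List.getLast?_eq_some_getLast] at hx
    subst this
    rfl
  | some lastE =>
    have hne : xs ≠ [] := by rintro rfl; simp at hx
    have hB : find_matching_texts_alt xs = (pvGroupRuns xs).getLastD [] := by
      unfold find_matching_texts_alt
      cases hg : (pvGroupRuns xs).getLast? with
      | none => simp [List.getLastD_eq_getLast?, hg]
      | some g => simp [List.getLastD_eq_getLast?, hg]
    rw [hB, pv_main]
    simp only [find_matching_texts, hx, pvCollectA_eq_takeWhile]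
    simp

-- ===== VERDICT (by name: the statement is the Claim_ definition above) =====
theorem find_matching_texts_spec : Claim_equal_find_matching_texts := by
  intro xs _
  exact pv_port_eq xs
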